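-- pv_equiv track=rewrite | github.com/AlexgrothViro/Vers4.0 | scripts/97_make_demo_fastq.py | pick_reference
-- ===== SOURCE A (Python) =====
-- def pick_reference(records, need_len: int, mode: str):
--     """
--     Seleciona a sequência de referência a partir de um multi-FASTA.
--     mode:
--       - first_valid: primeira com len >= need_len
--       - longest: maior com len >= need_len
--       - first: primeira sempre (legado)
--     """
--     if mode == "first":
--         return records[0]
--
--     valid = [(h, s) for (h, s) in records if len(s) >= need_len]
--
--     if mode == "first_valid":
--         if valid:
--             return valid[0]
--     elif mode == "longest":
--         if valid:
--             return max(valid, key=lambda x: len(x[1]))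
--
--     # Se chegou aqui: ninguém atende ao mínimo
--     longest = max(records, key=lambda x: len(x[1]))
--     top_lens = sorted([len(s) for _, s in records], reverse=True)[:10]
--     raise SystemExit(
--         f"[ERRO] Referência curta demais para o insert atual.\n"
--         f"       Precisa >= {need_len} bp, mas nenhuma sequência atende.\n"
--         f"       Maior sequência tem {len(longest[1])} bp.\n"
--         f"       Top lengths: {top_lens}\n"
--         f"       Dica: reduza --insert ou use um FASTA com genoma completo."
--     )
-- ===== SOURCE B (Python) =====
-- def pick_reference(records, need_len: int, mode: str):
--     """Single pass over records keeping the first valid and the longest valid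
--     record, instead of building the 'valid' list and rescanning it."""
--     if mode == "first":
--         return records[0]
--
--     first_valid = None
--     longest_valid = None
--     for rec in records:
--         if len(rec[1]) >= need_len:
--             if first_valid is None:
--                 first_valid = rec
--             if longest_valid is None or len(rec[1]) > len(longest_valid[1]):
--                 longest_valid = rec
--
--     if mode == "first_valid" and first_valid is not None:
--         return first_valid
--     if mode == "longest" and longest_valid is not None:
--         return longest_valid
--
--     # No record meets the minimum (or unknown mode): same diagnostic exit.
--     lengths = sorted((len(s) for _, s in records), reverse=True)
--     top_lens = lengths[:10]
--     raise SystemExit(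
--         f"[ERRO] Referência curta demais para o insert atual.\n"
--         f"       Precisa >= {need_len} bp, mas nenhuma sequência atende.\n"
--         f"       Maior sequência tem {lengths[0]} bp.\n"
--         f"       Top lengths: {top_lens}\n"
--         f"       Dica: reduza --insert ou use um FASTA com genoma completo."
--     )
-- ===== Notes on version B (the rewrite author's own statement) =====
-- stated objective: simpler
-- what changed: Replaces the build-the-valid-list-then-rescan structure (list comprehension + indexing/max) with one fold over records that maintains the first valid and the longest valid record, dispatching on mode afterwards.
import Mathlib
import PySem

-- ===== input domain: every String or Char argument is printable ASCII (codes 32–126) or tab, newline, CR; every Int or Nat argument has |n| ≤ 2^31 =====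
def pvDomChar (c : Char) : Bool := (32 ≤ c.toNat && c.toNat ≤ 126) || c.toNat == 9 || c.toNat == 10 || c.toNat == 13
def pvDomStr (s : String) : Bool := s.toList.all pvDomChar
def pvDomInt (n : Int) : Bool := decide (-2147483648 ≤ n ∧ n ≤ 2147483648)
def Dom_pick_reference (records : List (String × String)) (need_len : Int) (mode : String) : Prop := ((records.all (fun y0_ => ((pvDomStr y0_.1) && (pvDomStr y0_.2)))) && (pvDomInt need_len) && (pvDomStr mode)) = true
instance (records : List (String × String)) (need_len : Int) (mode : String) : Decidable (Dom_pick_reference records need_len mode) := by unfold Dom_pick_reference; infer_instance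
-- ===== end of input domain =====

-- B replaces A's build-the-valid-list-then-rescan with a single fold keeping the
-- first valid and the longest valid record (objective: simpler, one pass).
-- Both Pythons raise (SystemExit / IndexError / ValueError) outside Pre_; equivalence is about returned values.

-- ===== PORT A =====
def pick_reference (records : List (String × String)) (need_len : Int) (mode : String) : String × String :=
  if mode == "first" then
    (PySem.List.pyGet? records 0).getD ("", "")  -- records[0]; [] raises IndexError, excluded by Pre_
  else
    let valid := records.filter (fun p => decide (need_len ≤ PySem.Str.len p.2))
    if mode == "first_valid" then
      match valid with
      | v :: _ => v
      | [] => ("", "")            -- falls through to raise SystemExit: excluded by Pre_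
    else if mode == "longest" then
      match PySem.List.max? valid (fun x => PySem.Str.len x.2) with
      | some m => m
      | none => ("", "")          -- falls through to raise SystemExit: excluded by Pre_
    else ("", "")                 -- unknown mode raises SystemExit: excluded by Pre_

-- ===== PORT B =====
-- loop body of Source B: update (first_valid, longest_valid) with one record
def pvStepB (need_len : Int) (st : Option (String × String) × Option (String × String))
    (rec : String × String) : Option (String × String) × Option (String × String) :=
  if need_len ≤ PySem.Str.len rec.2 then
    ((match st.1 with | none => some rec | some v => some v),
     (match st.2 with
      | none => some rec
      | some lv => if PySem.Str.len lv.2 < PySem.Str.len rec.2 then some rec else some lv))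
  else st

def pick_reference_alt (records : List (String × String)) (need_len : Int) (mode : String) : String × String :=
  if mode == "first" then
    (PySem.List.pyGet? records 0).getD ("", "")
  else
    let st := records.foldl (pvStepB need_len) (none, none)
    if mode == "first_valid" then
      match st.1 with | some v => v | none => ("", "")   -- none: Source B raises SystemExit, excluded by Pre_
    else if mode == "longest" then
      match st.2 with | some v => v | none => ("", "")
    else ("", "")

-- ===== PRECONDITION & SPEC =====
-- Pre_ holds exactly where the Python A returns: mode "first" needs a nonempty list
-- (else IndexError); modes "first_valid"/"longest" need some record with len >= need_len
-- (else SystemExit, or ValueError on empty records); any other mode raises SystemExit.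
def Pre_pick_reference (records : List (String × String)) (need_len : Int) (mode : String) : Prop :=
  (mode = "first" ∧ records ≠ []) ∨
  ((mode = "first_valid" ∨ mode = "longest") ∧ ∃ p ∈ records, need_len ≤ PySem.Str.len p.2)
instance (records : List (String × String)) (need_len : Int) (mode : String) : Decidable (Pre_pick_reference records need_len mode) := by unfold Pre_pick_reference; infer_instance

def pvWitness_pick_reference : (List (String × String)) × Int × String := ([("h1", "ACGT"), ("h2", "AC")], 3, "longest")

def Spec_pick_reference (records : List (String × String)) (need_len : Int) (mode : String) (out : String × String) : Prop := out = pick_reference_alt records need_len mode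
instance (records : List (String × String)) (need_len : Int) (mode : String) (out : String × String) : Decidable (Spec_pick_reference records need_len mode out) := by unfold Spec_pick_reference; infer_instance

-- ===== CLAIM (what is proved, stated in full; the proofs are below) =====
def Claim_equal_pick_reference : Prop := ∀ (records : List (String × String)) (need_len : Int) (mode : String), Dom_pick_reference records need_len mode → Pre_pick_reference records need_len mode → Spec_pick_reference records need_len mode (pick_reference records need_len mode)

-- ===== LEMMAS AND PROOFS =====

-- the running-max update (same update max? performs), named so both ports' folds can be rewritten to it
def pvMaxStep (acc : Option (String × String)) (x : String × String) : Option (String × String) :=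
  match acc with
  | none => some x
  | some m => if PySem.Str.len m.2 < PySem.Str.len x.2 then some x else some m

lemma max?_eq_foldl (l : List (String × String)) :
    PySem.List.max? l (fun x => PySem.Str.len x.2) = l.foldl pvMaxStep none := by
  simp only [PySem.List.max?]
  apply List.foldl_ext
  intro acc x _
  cases acc <;> rfl

-- B's single fold computes the head of A's 'valid' list and the running max over it.
lemma foldB_spec (need_len : Int) (l : List (String × String)) :
    ∀ (s1 s2 : Option (String × String)),
    l.foldl (pvStepB need_len) (s1, s2) =
      ((match s1 with
        | some v => some v
        | none => (l.filter (fun p => decide (need_len ≤ PySem.Str.len p.2))).head?),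
       (l.filter (fun p => decide (need_len ≤ PySem.Str.len p.2))).foldl pvMaxStep s2) := by
  induction l with
  | nil => intro s1 s2; cases s1 <;> rfl
  | cons r t ih =>
    intro s1 s2
    by_cases h : need_len ≤ PySem.Str.len r.2
    · simp only [List.foldl_cons, List.filter_cons, h, decide_true, if_pos, pvStepB]
      rw [ih]
      cases s1 <;> simp [pvMaxStep]
    · simp only [List.foldl_cons, List.filter_cons, h, decide_false, pvStepB]
      rw [ih]
      simp

theorem pick_reference_spec : Claim_equal_pick_reference := by
  intro records need_len mode _ _
  unfold Spec_pick_reference pick_reference pick_reference_alt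
  by_cases hf : mode == "first"
  · simp [hf]
  · simp only [hf, Bool.false_eq_true, if_false]
    rw [foldB_spec]
    by_cases hfv : mode == "first_valid"
    · simp only [hfv, if_true]
      cases records.filter (fun p => decide (need_len ≤ PySem.Str.len p.2)) <;> simp
    · simp only [hfv, Bool.false_eq_true, if_false]
      by_cases hl : mode == "longest"
      · simp only [hl, if_true, max?_eq_foldl]
      · simp [hl]
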